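-- pv_equiv track=rewrite | github.com/codeoverrr/Reddit-Classifier | ingest_data.py | classify_toxicity
-- ===== SOURCE A (Python) =====
-- TOXIC_KEYWORDS = {
--     'hate_speech': [
--         'hate', 'racist', 'racism', 'nazi', 'fascist', 'supremacist', 'bigot', 'xenophobic',
--         'antisemitic', 'islamophobic', 'kill yourself', 'kys', 'die', 'murder', 'lynch',
--         'ethnic cleansing', 'genocide', 'inferior race', 'subhuman', 'savage'
--     ],
--     'harassment': [
--         'harassment', 'harass', 'stalking', 'stalk', 'doxxing', 'dox', 'threatening', 'threat',
--         'intimidation', 'intimidate', 'cyberbully', 'bullying', 'troll', 'trolling',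
--         'witch hunt', 'mob', 'cancel', 'brigade', 'spam', 'abuse', 'victim blaming'
--     ],
--     'insults': [
--         'stupid', 'idiot', 'moron', 'retard', 'retarded', 'dumb', 'dumbass', 'fool', 'foolish',
--         'bitch', 'asshole', 'piece of shit', 'scumbag', 'loser', 'pathetic', 'worthless',
--         'trash', 'garbage', 'waste of space', 'fat', 'ugly', 'disgusting', 'pig'
--     ],
--     'threats': [
--         'threat', 'threaten', 'kill', 'murder', 'hurt', 'harm', 'violence', 'violent',
--         'assault', 'attack', 'beat up', 'punch', 'shoot', 'stab', 'bomb', 'terrorism',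
--         'terrorist', 'explosive', 'weapon', 'gun', 'knife', 'poison'
--     ],
--     'discrimination': [
--         'sexist', 'sexism', 'misogyny', 'misogynist', 'homophobic', 'homophobia',
--         'transphobic', 'transphobia', 'discriminate', 'discrimination', 'prejudice',
--         'stereotyping', 'profiling', 'ageism', 'ableism', 'classism'
--     ],
--     'self_harm': [
--         'suicide', 'suicidal', 'self harm', 'cutting', 'overdose', 'jumping off',
--         'hanging', 'kill myself', 'end it all', 'want to die', 'better off dead'
--     ]
-- }
--
-- ADULT_CONTENT_KEYWORDS = [
--     # Explicit sexual terms
--     'sex', 'sexual', 'fuck', 'fucking', 'cock', 'dick', 'penis', 'pussy', 'vagina',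
--     'cum', 'cumming', 'orgasm', 'climax', 'masturbate', 'masturbation', 'jerk off',
--     'blow job', 'blowjob', 'handjob', 'oral sex', 'anal sex', 'penetration',
--     # Body parts
--     'nipples', 'breasts', 'tits', 'boobs', 'ass', 'butt', 'butthole', 'anus',
--     'clitoris', 'clit', 'labia', 'testicles', 'balls', 'shaft', 'head',
--     # Adult industry and content
--     'porn', 'pornography', 'xxx', 'nsfw', 'adult', 'erotic', 'erotica',
--     'nude', 'naked', 'strip', 'stripper', 'escort', 'prostitute', 'hooker',
--     # Activities and behaviors
--     'intimate', 'intimacy', 'foreplay', 'fetish', 'kink', 'bdsm', 'bondage',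
--     'dominance', 'submission', 'roleplay', 'fantasy', 'threesome', 'orgy',
--     'gangbang', 'bukkake', 'creampie', 'deepthroat', 'facefuck',
--     # Adjectives and states
--     'sexy', 'hot', 'horny', 'aroused', 'turned on', 'wet', 'hard', 'stiff',
--     'naughty', 'dirty', 'slutty', 'kinky', 'perverted', 'lustful'
-- ]
--
-- def classify_toxicity(text, subreddit=None):
--     """Enhanced toxicity classification with subreddit context and severity levels."""
--     text_lower = text.lower()
--
--     # Count different types of toxic content with severity weighting
--     toxicity_score = 0
--
--     for category, keywords in TOXIC_KEYWORDS.items():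
--         category_count = sum(1 for keyword in keywords if keyword in text_lower)
--
--         # Weight different categories by severity
--         if category in ['hate_speech', 'threats', 'self_harm']:
--             toxicity_score += category_count * 5  # Most severe
--         elif category in ['harassment', 'discrimination']:
--             toxicity_score += category_count * 3  # Moderately severe
--         else:
--             toxicity_score += category_count * 2  # Less severe but still toxic
--
--     # Context from subreddit - some subs are more tolerant of strong language
--     if subreddit:
--         subreddit_lower = subreddit.lower()
--         # Subreddits where strong language is more common but not necessarily toxic
--         casual_subs = ['wallstreetbets', 'roastme', 'circlejerk', 'dankmemes',
--                        'okbuddyretard', 'shitposting', 'comedyheaven']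
--         if any(sub in subreddit_lower for sub in casual_subs):
--             toxicity_score = max(0, toxicity_score - 2)  # Reduce toxicity score
--
--     # Adult content alone is not toxic unless combined with harmful elements
--     adult_content_count = sum(1 for keyword in ADULT_CONTENT_KEYWORDS if keyword in text_lower)
--
--     # Only consider toxic if there are actual harmful keywords, not just adult content
--     # Adjusted threshold for better precision
--     if toxicity_score >= 3:
--         return 'toxic'
--     elif adult_content_count > 0 and toxicity_score <= 1:
--         return 'non_toxic'  # Adult but not harmful
--     else:
--         return 'non_toxic'
-- ===== SOURCE B (Python) =====
-- # Different algorithm: a single left-to-right scan of the text with a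
-- # first-character index of keywords (a one-level trie), collecting the set of
-- # keywords that occur, then one lookup per found keyword in a merged
-- # keyword->total-weight dict (cross-category duplicates merged by SUMMING
-- # their category weights), instead of A's per-keyword substring searches.
--
-- TOXIC_KEYWORDS = {
--     'hate_speech': [
--         'hate', 'racist', 'racism', 'nazi', 'fascist', 'supremacist', 'bigot', 'xenophobic',
--         'antisemitic', 'islamophobic', 'kill yourself', 'kys', 'die', 'murder', 'lynch',
--         'ethnic cleansing', 'genocide', 'inferior race', 'subhuman', 'savage'
--     ],
--     'harassment': [
--         'harassment', 'harass', 'stalking', 'stalk', 'doxxing', 'dox', 'threatening', 'threat',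
--         'intimidation', 'intimidate', 'cyberbully', 'bullying', 'troll', 'trolling',
--         'witch hunt', 'mob', 'cancel', 'brigade', 'spam', 'abuse', 'victim blaming'
--     ],
--     'insults': [
--         'stupid', 'idiot', 'moron', 'retard', 'retarded', 'dumb', 'dumbass', 'fool', 'foolish',
--         'bitch', 'asshole', 'piece of shit', 'scumbag', 'loser', 'pathetic', 'worthless',
--         'trash', 'garbage', 'waste of space', 'fat', 'ugly', 'disgusting', 'pig'
--     ],
--     'threats': [
--         'threat', 'threaten', 'kill', 'murder', 'hurt', 'harm', 'violence', 'violent',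
--         'assault', 'attack', 'beat up', 'punch', 'shoot', 'stab', 'bomb', 'terrorism',
--         'terrorist', 'explosive', 'weapon', 'gun', 'knife', 'poison'
--     ],
--     'discrimination': [
--         'sexist', 'sexism', 'misogyny', 'misogynist', 'homophobic', 'homophobia',
--         'transphobic', 'transphobia', 'discriminate', 'discrimination', 'prejudice',
--         'stereotyping', 'profiling', 'ageism', 'ableism', 'classism'
--     ],
--     'self_harm': [
--         'suicide', 'suicidal', 'self harm', 'cutting', 'overdose', 'jumping off',
--         'hanging', 'kill myself', 'end it all', 'want to die', 'better off dead'
--     ]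
-- }
--
-- # keyword -> total weight: a keyword listed in several categories contributes
-- # each category's weight, so its merged weight is the SUM of those weights.
-- _WEIGHT = {}
-- for _cat, _kws in TOXIC_KEYWORDS.items():
--     _w = 5 if _cat in ('hate_speech', 'threats', 'self_harm') else \
--          3 if _cat in ('harassment', 'discrimination') else 2
--     for _kw in _kws:
--         _WEIGHT[_kw] = _WEIGHT.get(_kw, 0) + _w
--
-- # first character -> the (distinct) keywords starting with it
-- _INDEX = {}
-- for _kw in _WEIGHT:
--     _INDEX.setdefault(_kw[0], []).append(_kw)
--
-- _CASUAL_SUBS = ['wallstreetbets', 'roastme', 'circlejerk', 'dankmemes',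
--                 'okbuddyretard', 'shitposting', 'comedyheaven']
--
--
-- def classify_toxicity(text, subreddit=None):
--     t = text.lower()
--     found = set()
--     for i in range(len(t)):
--         for kw in _INDEX.get(t[i], []):
--             if kw not in found and t.startswith(kw, i):
--                 found.add(kw)
--     score = sum(_WEIGHT[kw] for kw in found)
--     if subreddit:
--         sub_lower = subreddit.lower()
--         if any(s in sub_lower for s in _CASUAL_SUBS):
--             score = max(0, score - 2)
--     return 'toxic' if score >= 3 else 'non_toxic'
-- ===== Notes on version B (the rewrite author's own statement) =====
-- stated objective: alternative
-- what changed: Replaces A's per-keyword substring searches and nested per-category weighting with a single left-to-right scan of the text using a first-character index of keywords to collect the set of keywords present, then sums each found keyword's merged cross-category weight from one keyword-to-weight dict; the adult-content count, whose branches return the same value, is dropped.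
import Mathlib
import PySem

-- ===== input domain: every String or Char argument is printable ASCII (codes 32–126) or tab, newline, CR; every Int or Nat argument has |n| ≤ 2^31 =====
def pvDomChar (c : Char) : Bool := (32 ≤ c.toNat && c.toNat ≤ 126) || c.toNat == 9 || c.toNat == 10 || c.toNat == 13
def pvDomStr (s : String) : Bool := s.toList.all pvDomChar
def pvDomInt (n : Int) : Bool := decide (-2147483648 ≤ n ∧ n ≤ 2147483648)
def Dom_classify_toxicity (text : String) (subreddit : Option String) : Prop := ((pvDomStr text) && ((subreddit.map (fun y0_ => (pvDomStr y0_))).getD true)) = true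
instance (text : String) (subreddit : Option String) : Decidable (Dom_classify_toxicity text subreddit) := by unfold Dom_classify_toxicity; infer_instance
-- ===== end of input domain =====

-- B replaces A's per-keyword substring searches by one left-to-right scan of the
-- text with a first-character index of keywords; same return value (objective: alternative).

-- ===== PORT A =====
-- Shared module constants (data from the Python module, used by both ports)
def pvToxicCats : List (String × List String) := [
  ("hate_speech", ["hate", "racist", "racism", "nazi", "fascist", "supremacist", "bigot", "xenophobic",
    "antisemitic", "islamophobic", "kill yourself", "kys", "die", "murder", "lynch",
    "ethnic cleansing", "genocide", "inferior race", "subhuman", "savage"]),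
  ("harassment", ["harassment", "harass", "stalking", "stalk", "doxxing", "dox", "threatening", "threat",
    "intimidation", "intimidate", "cyberbully", "bullying", "troll", "trolling",
    "witch hunt", "mob", "cancel", "brigade", "spam", "abuse", "victim blaming"]),
  ("insults", ["stupid", "idiot", "moron", "retard", "retarded", "dumb", "dumbass", "fool", "foolish",
    "bitch", "asshole", "piece of shit", "scumbag", "loser", "pathetic", "worthless",
    "trash", "garbage", "waste of space", "fat", "ugly", "disgusting", "pig"]),
  ("threats", ["threat", "threaten", "kill", "murder", "hurt", "harm", "violence", "violent",
    "assault", "attack", "beat up", "punch", "shoot", "stab", "bomb", "terrorism",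
    "terrorist", "explosive", "weapon", "gun", "knife", "poison"]),
  ("discrimination", ["sexist", "sexism", "misogyny", "misogynist", "homophobic", "homophobia",
    "transphobic", "transphobia", "discriminate", "discrimination", "prejudice",
    "stereotyping", "profiling", "ageism", "ableism", "classism"]),
  ("self_harm", ["suicide", "suicidal", "self harm", "cutting", "overdose", "jumping off",
    "hanging", "kill myself", "end it all", "want to die", "better off dead"])]

def pvCasualSubs : List String := ["wallstreetbets", "roastme", "circlejerk", "dankmemes",
  "okbuddyretard", "shitposting", "comedyheaven"]

def pvAdultKeywords : List String := ["sex", "sexual", "fuck", "fucking", "cock", "dick", "penis", "pussy", "vagina",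
  "cum", "cumming", "orgasm", "climax", "masturbate", "masturbation", "jerk off",
  "blow job", "blowjob", "handjob", "oral sex", "anal sex", "penetration",
  "nipples", "breasts", "tits", "boobs", "ass", "butt", "butthole", "anus",
  "clitoris", "clit", "labia", "testicles", "balls", "shaft", "head",
  "porn", "pornography", "xxx", "nsfw", "adult", "erotic", "erotica",
  "nude", "naked", "strip", "stripper", "escort", "prostitute", "hooker",
  "intimate", "intimacy", "foreplay", "fetish", "kink", "bdsm", "bondage",
  "dominance", "submission", "roleplay", "fantasy", "threesome", "orgy",
  "gangbang", "bukkake", "creampie", "deepthroat", "facefuck",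
  "sexy", "hot", "horny", "aroused", "turned on", "wet", "hard", "stiff",
  "naughty", "dirty", "slutty", "kinky", "perverted", "lustful"]

def classify_toxicity (text : String) (subreddit : Option String) : String :=
  let text_lower := PySem.Str.lower text
  let toxicity_score : Int := pvToxicCats.foldl (fun acc p =>
    let category_count : Int := (p.2.countP (fun kw => PySem.Str.isIn kw text_lower) : Int)
    if p.1 ∈ (["hate_speech", "threats", "self_harm"] : List String) then acc + category_count * 5
    else if p.1 ∈ (["harassment", "discrimination"] : List String) then acc + category_count * 3
    else acc + category_count * 2) 0
  let toxicity_score : Int :=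
    match subreddit with
    | none => toxicity_score
    | some s =>
      if s ≠ "" then
        if pvCasualSubs.any (fun sub => PySem.Str.isIn sub (PySem.Str.lower s)) then
          max 0 (toxicity_score - 2)
        else toxicity_score
      else toxicity_score
  let adult_content_count : Int := (pvAdultKeywords.countP (fun kw => PySem.Str.isIn kw text_lower) : Int)
  if toxicity_score ≥ 3 then "toxic"
  else if adult_content_count > 0 ∧ toxicity_score ≤ 1 then "non_toxic"
  else "non_toxic"

-- ===== PORT B =====
-- keyword -> total weight (cross-category duplicates merged by summing), as in Source B
def pvWeight : PySem.Dict String Int :=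
  pvToxicCats.foldl (fun d p =>
    let w : Int := if p.1 ∈ (["hate_speech", "threats", "self_harm"] : List String) then 5
      else if p.1 ∈ (["harassment", "discrimination"] : List String) then 3 else 2
    p.2.foldl (fun d kw => d.insert kw (d.getD kw 0 + w)) d) PySem.Dict.empty

-- first character -> keywords starting with it (kw[0] is exact as headD since every key is nonempty)
def pvIndex : PySem.Dict Char (List String) :=
  pvWeight.keys.foldl (fun d kw => d.modify (kw.toList.headD ' ') [] (fun b => b ++ [kw])) PySem.Dict.empty

def classify_toxicity_alt (text : String) (subreddit : Option String) : String :=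
  let tl := (PySem.Str.lower text).toList
  -- i ranges over range(len(t)), always in bounds, so t[i] is ported as tl.getD i ' ' (exact);
  -- t.startswith(kw, i) with 0 ≤ i ≤ len(t) is exactly Chars.startswith on tl.drop i.
  let found : PySem.Set String := (List.range tl.length).foldl (fun s i =>
    (pvIndex.getD (tl.getD i ' ') []).foldl (fun s kw =>
      if (!(PySem.Set.contains s kw) && PySem.Chars.startswith (tl.drop i) kw.toList) = true
      then PySem.Set.add s kw else s) s) PySem.Set.empty
  -- _WEIGHT[kw] never raises: every found kw is a key; ported as getD kw 0 (exact)
  let score : Int := List.foldl (fun a kw => a + pvWeight.getD kw 0) 0 found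
  let score : Int :=
    match subreddit with
    | none => score
    | some s =>
      if s ≠ "" then
        if pvCasualSubs.any (fun sub => PySem.Str.isIn sub (PySem.Str.lower s)) then
          max 0 (score - 2)
        else score
      else score
  if score ≥ 3 then "toxic" else "non_toxic"

-- ===== PRECONDITION & SPEC =====
def Spec_classify_toxicity (text : String) (subreddit : Option String) (out : String) : Prop := out = classify_toxicity_alt text subreddit
instance (text : String) (subreddit : Option String) (out : String) : Decidable (Spec_classify_toxicity text subreddit out) := by unfold Spec_classify_toxicity; infer_instance

-- ===== CLAIM =====
def Claim_equal_classify_toxicity : Prop := ∀ (text : String) (subreddit : Option String), Dom_classify_toxicity text subreddit → Spec_classify_toxicity text subreddit (classify_toxicity text subreddit)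

-- ===== LEMMAS AND PROOFS =====

-- A's severity weight of a category, as a function
def pvW (cat : String) : Int :=
  if cat ∈ (["hate_speech", "threats", "self_harm"] : List String) then 5
  else if cat ∈ (["harassment", "discrimination"] : List String) then 3 else 2

-- the flat multiset of (keyword, category weight) pairs
def pvPairs : List (String × Int) := pvToxicCats.flatMap (fun q => q.2.map (fun kw => (kw, pvW q.1)))

-- sum of the weights of the pairs whose keyword satisfies p
def sumP (p : String → Bool) (l : List (String × Int)) : Int :=
  (l.map (fun q => if p q.1 then q.2 else 0)).sum

-- B's found-set, as a standalone function of the lowered text (definitionally B's inner fold)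
def pvFound (tl : List Char) : PySem.Set String :=
  (List.range tl.length).foldl (fun s i =>
    (pvIndex.getD (tl.getD i ' ') []).foldl (fun s kw =>
      if (!(PySem.Set.contains s kw) && PySem.Chars.startswith (tl.drop i) kw.toList) = true
      then PySem.Set.add s kw else s) s) PySem.Set.empty

lemma sumP_nil (p : String → Bool) : sumP p [] = 0 := rfl

lemma sumP_cons (p : String → Bool) (q : String × Int) (l : List (String × Int)) :
    sumP p (q :: l) = (if p q.1 then q.2 else 0) + sumP p l := by
  simp [sumP]

lemma sumP_append (p : String → Bool) (l₁ l₂ : List (String × Int)) :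
    sumP p (l₁ ++ l₂) = sumP p l₁ + sumP p l₂ := by
  simp [sumP]

lemma countP_mul (p : String → Bool) (w : Int) (kws : List String) :
    (kws.countP p : Int) * w = (kws.map (fun kw => if p kw then w else 0)).sum := by
  induction kws with
  | nil => simp
  | cons a t ih =>
    by_cases h : p a <;> simp [h, ← ih] <;> try ring

lemma A_fold_eq (p : String → Bool) :
    pvToxicCats.foldl (fun acc q =>
      let category_count : Int := (q.2.countP p : Int)
      if q.1 ∈ (["hate_speech", "threats", "self_harm"] : List String) then acc + category_count * 5
      else if q.1 ∈ (["harassment", "discrimination"] : List String) then acc + category_count * 3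
      else acc + category_count * 2) 0 = sumP p pvPairs := by
  have hbody : (fun (acc : Int) (q : String × List String) =>
      let category_count : Int := (q.2.countP p : Int)
      if q.1 ∈ (["hate_speech", "threats", "self_harm"] : List String) then acc + category_count * 5
      else if q.1 ∈ (["harassment", "discrimination"] : List String) then acc + category_count * 3
      else acc + category_count * 2)
      = (fun (acc : Int) (q : String × List String) => acc + (q.2.countP p : Int) * pvW q.1) := by
    funext acc q
    simp only [pvW]
    split_ifs <;> rfl
  rw [hbody, PySem.List.foldl_add]
  unfold sumP pvPairs
  rw [List.map_flatMap, List.flatMap_def, List.sum_flatten, List.map_map, zero_add]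
  congr 1
  apply List.map_congr_left
  intro q _
  simp only [Function.comp, List.map_map]
  rw [countP_mul]
  rfl

lemma pvWeight_eq_flat :
    pvWeight = pvPairs.foldl (fun d q => d.insert q.1 (d.getD q.1 0 + q.2)) PySem.Dict.empty := by
  unfold pvWeight pvPairs
  rw [List.foldl_flatMap]
  have hstep : ∀ (d : PySem.Dict String Int) (q : String × List String),
      (let w : Int := if q.1 ∈ (["hate_speech", "threats", "self_harm"] : List String) then 5
        else if q.1 ∈ (["harassment", "discrimination"] : List String) then 3 else 2
       q.2.foldl (fun d kw => d.insert kw (d.getD kw 0 + w)) d)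
      = (q.2.map (fun kw => (kw, pvW q.1))).foldl
          (fun d q' => d.insert q'.1 (d.getD q'.1 0 + q'.2)) d := by
    intro d q
    rw [List.foldl_map]
    simp only [pvW]
  congr 1
  funext d q
  exact hstep d q

lemma map_update_sum (p : String → Bool) :
    ∀ (l : List (String × Int)), (l.map Prod.fst).Nodup →
      ∀ (k : String) (v w : Int), (k, v) ∈ l →
        sumP p (l.map (fun q => if (q.1 == k) = true then (k, v + w) else q))
          = sumP p l + (if p k then w else 0) := by
  intro l
  induction l with
  | nil => intro _ k v w hv; simp at hv
  | cons q t ih =>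
    intro hnd k v w hv
    rw [List.map_cons] at hnd ⊢
    have hnd' := List.nodup_cons.mp hnd
    by_cases hq : q.1 = k
    · have hknot : k ∉ t.map Prod.fst := hq ▸ hnd'.1
      have hqv : q = (k, v) := by
        rcases List.mem_cons.mp hv with h | h
        · exact h.symm
        · exact absurd (hq ▸ List.mem_map_of_mem h : q.1 ∈ t.map Prod.fst) (hq ▸ hnd'.1)
      have hmap : t.map (fun q' => if (q'.1 == k) = true then (k, v + w) else q') = t := by
        conv_rhs => rw [← List.map_id t]
        apply List.map_congr_left
        intro x hx
        have hx1 : x.1 ≠ k := fun h => hknot (h ▸ List.mem_map_of_mem hx)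
        simp [hx1]
      rw [hqv, hmap, sumP_cons, sumP_cons]
      simp only [BEq.rfl]
      split_ifs <;> ring
    · have hvt : (k, v) ∈ t := by
        rcases List.mem_cons.mp hv with h | h
        · exact absurd (congrArg Prod.fst h.symm) hq
        · exact h
      have hbeq : (q.1 == k) = false := by simp [hq]
      rw [hbeq, sumP_cons, sumP_cons, ih hnd'.2 k v w hvt]
      simp only [Bool.false_eq_true, if_false]
      ring

lemma insert_sum (p : String → Bool) (d : PySem.Dict String Int) (hnd : d.keys.Nodup)
    (k : String) (w : Int) :
    sumP p (d.insert k (d.getD k 0 + w)).items = sumP p d.items + (if p k then w else 0) := by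
  cases hc : d.contains k with
  | false =>
    have hg : d.getD k 0 = 0 := PySem.Dict.getD_of_not_contains d 0 hc
    rw [PySem.Dict.items_insert_of_not_contains d _ hc, hg, sumP_append, sumP_cons, sumP_nil]
    split_ifs <;> ring
  | true =>
    rw [PySem.Dict.items_insert_of_contains d _ hc]
    have hnd' : (d.items.map Prod.fst).Nodup := hnd
    have hsome : (d.get? k).isSome := by
      rw [← PySem.Dict.contains_eq_isSome_get?]; exact hc
    obtain ⟨v, hv⟩ := Option.isSome_iff_exists.mp hsome
    have hgd : d.getD k 0 = v := by rw [PySem.Dict.getD_eq_get?_getD, hv]; rfl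
    have hmem : (k, d.getD k 0) ∈ d.items := by
      rw [hgd]
      exact (PySem.Dict.get?_eq_some_iff_mem_items d k v hnd).mp hv
    exact map_update_sum p d.items hnd' k _ w hmem

lemma merge_sum (p : String → Bool) :
    ∀ (l : List (String × Int)) (d : PySem.Dict String Int), d.keys.Nodup →
      sumP p ((l.foldl (fun d q => d.insert q.1 (d.getD q.1 0 + q.2)) d).items)
        = sumP p d.items + sumP p l := by
  intro l
  induction l with
  | nil => intro d _; simp [sumP_nil]
  | cons q t ih =>
    intro d hnd
    rw [List.foldl_cons, ih _ (PySem.Dict.nodup_keys_insert d q.1 _ hnd),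
        insert_sum p d hnd, sumP_cons]
    ring

lemma keys_pvWeight : pvWeight.keys = PySem.Set.ofList (pvPairs.map Prod.fst) := by
  rw [pvWeight_eq_flat]
  rw [PySem.Dict.keys_foldl_insert_key pvPairs Prod.fst _ PySem.Dict.empty]
  simp [PySem.Set.update_nil_left]

lemma nodup_keys_pvWeight : pvWeight.keys.Nodup := by
  rw [keys_pvWeight]; exact PySem.Set.nodup_ofList _

lemma mem_keys_ne_nil (kw : String) (h : kw ∈ pvWeight.keys) : kw.toList ≠ [] := by
  rw [keys_pvWeight, PySem.Set.mem_ofList] at h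
  have hall : (pvPairs.map Prod.fst).all (fun kw => !kw.toList.isEmpty) = true := by decide
  have := List.all_eq_true.mp hall kw h
  simpa using this

lemma index_getD (c : Char) :
    ∀ (l : List String) (d : PySem.Dict Char (List String)),
      (l.foldl (fun d kw => d.modify (kw.toList.headD ' ') [] (fun b => b ++ [kw])) d).getD c []
        = d.getD c [] ++ l.filter (fun kw => kw.toList.headD ' ' == c) := by
  intro l
  induction l with
  | nil => intro d; simp
  | cons a t ih =>
    intro d
    rw [List.foldl_cons, ih, PySem.Dict.getD_modify]
    by_cases h : a.toList.headD ' ' = c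
    · subst h; simp
    · have h' : ¬ c = a.toList.headD ' ' := fun hc => h hc.symm
      simp only [List.headD_eq_head?_getD] at h h'
      simp [h, h']

lemma mem_bucket (kw : String) (c : Char) :
    kw ∈ pvIndex.getD c [] ↔ kw ∈ pvWeight.keys ∧ kw.toList.headD ' ' = c := by
  unfold pvIndex
  rw [index_getD]
  simp [List.mem_filter]

lemma mem_inner (tl : List Char) (i : Nat) (kw : String) :
    ∀ (bucket : List String) (s : PySem.Set String),
      kw ∈ bucket.foldl (fun s kw' =>
          if (!(PySem.Set.contains s kw') && PySem.Chars.startswith (tl.drop i) kw'.toList) = true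
          then PySem.Set.add s kw' else s) s
        ↔ kw ∈ s ∨ (kw ∈ bucket ∧ PySem.Chars.startswith (tl.drop i) kw.toList = true) := by
  intro bucket
  induction bucket with
  | nil => intro s; simp
  | cons b t ih =>
    intro s
    rw [List.foldl_cons, ih]
    constructor
    · rintro (hs | ⟨ht, hsw⟩)
      · split_ifs at hs with hc
        · rcases (PySem.Set.mem_add s b kw).mp hs with h | rfl
          · exact Or.inl h
          · exact Or.inr ⟨List.mem_cons_self, (by simpa using hc : kw ∉ s ∧ PySem.Chars.startswith (tl.drop i) kw.toList = true).2⟩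
        · exact Or.inl hs
      · exact Or.inr ⟨List.mem_cons_of_mem _ ht, hsw⟩
    · rintro (hs | ⟨hm, hsw⟩)
      · left; split_ifs with hc
        · exact (PySem.Set.mem_add s b kw).mpr (Or.inl hs)
        · exact hs
      · rcases List.mem_cons.mp hm with rfl | ht
        · left; split_ifs with hc
          · exact (PySem.Set.mem_add s kw kw).mpr (Or.inr rfl)
          · simp only [Bool.and_eq_true, Bool.not_eq_true'] at hc
            rw [not_and_or] at hc
            rcases hc with h | h
            · exact (PySem.Set.contains_iff s kw).mp (by simpa using h)
            · exact absurd hsw h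
        · exact Or.inr ⟨ht, hsw⟩

lemma nodup_inner (tl : List Char) (i : Nat) :
    ∀ (bucket : List String) (s : PySem.Set String), s.Nodup →
      (bucket.foldl (fun s kw' =>
          if (!(PySem.Set.contains s kw') && PySem.Chars.startswith (tl.drop i) kw'.toList) = true
          then PySem.Set.add s kw' else s) s).Nodup := by
  intro bucket
  induction bucket with
  | nil => intro s hs; simpa using hs
  | cons b t ih =>
    intro s hs
    rw [List.foldl_cons]
    apply ih
    split_ifs with hc
    · exact PySem.Set.nodup_add s b hs
    · exact hs

lemma mem_outer (tl : List Char) (kw : String) :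
    ∀ (n : Nat) (s : PySem.Set String),
      kw ∈ (List.range n).foldl (fun s i =>
          (pvIndex.getD (tl.getD i ' ') []).foldl (fun s kw' =>
            if (!(PySem.Set.contains s kw') && PySem.Chars.startswith (tl.drop i) kw'.toList) = true
            then PySem.Set.add s kw' else s) s) s
        ↔ kw ∈ s ∨ ∃ i < n, kw ∈ pvIndex.getD (tl.getD i ' ') [] ∧
            PySem.Chars.startswith (tl.drop i) kw.toList = true := by
  intro n
  induction n with
  | zero => intro s; simp
  | succ n ih =>
    intro s
    rw [List.range_succ, List.foldl_append, List.foldl_cons, List.foldl_nil,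
      mem_inner, ih]
    constructor
    · rintro ((hs | ⟨i, hi, hP⟩) | ⟨hb, hsw⟩)
      · exact Or.inl hs
      · exact Or.inr ⟨i, by omega, hP⟩
      · exact Or.inr ⟨n, by omega, hb, hsw⟩
    · rintro (hs | ⟨i, hi, hP⟩)
      · exact Or.inl (Or.inl hs)
      · by_cases h : i = n
        · subst h; exact Or.inr ⟨hP.1, hP.2⟩
        · exact Or.inl (Or.inr ⟨i, by omega, hP⟩)

lemma nodup_outer (tl : List Char) :
    ∀ (l : List Nat) (s : PySem.Set String), s.Nodup →
      ((l.foldl (fun s i =>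
          (pvIndex.getD (tl.getD i ' ') []).foldl (fun s kw' =>
            if (!(PySem.Set.contains s kw') && PySem.Chars.startswith (tl.drop i) kw'.toList) = true
            then PySem.Set.add s kw' else s) s) s) : PySem.Set String).Nodup := by
  intro l
  induction l with
  | nil => intro s hs; simpa using hs
  | cons a t ih =>
    intro s hs
    rw [List.foldl_cons]
    exact ih _ (nodup_inner tl a _ s hs)

lemma nodup_pvFound (tl : List Char) : (pvFound tl).Nodup := by
  unfold pvFound
  exact nodup_outer tl _ _ (by simp [PySem.Set.empty])

lemma mem_pvFound (tl : List Char) (kw : String) :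
    kw ∈ pvFound tl ↔ kw ∈ pvWeight.keys ∧ PySem.Chars.isIn kw.toList tl = true := by
  unfold pvFound
  rw [mem_outer]
  constructor
  · rintro (hs | ⟨i, hi, hb, hsw⟩)
    · simp [PySem.Set.empty] at hs
    · refine ⟨((mem_bucket kw _).mp hb).1, ?_⟩
      exact (PySem.Chars.exists_prefix_drop_iff_isIn kw.toList tl).mp
        ⟨i, (PySem.Chars.startswith_iff _ _).mp hsw⟩
  · rintro ⟨hk, hin⟩
    obtain ⟨j, hpre⟩ := (PySem.Chars.exists_prefix_drop_iff_isIn kw.toList tl).mpr hin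
    have hne := mem_keys_ne_nil kw hk
    obtain ⟨c, rest, hkw⟩ : ∃ c rest, kw.toList = c :: rest := by
      cases h : kw.toList with
      | nil => exact absurd h hne
      | cons c rest => exact ⟨c, rest, rfl⟩
    obtain ⟨suf, hsuf⟩ := hpre
    have hj : j < tl.length := by
      by_contra hj
      have : tl.drop j = [] := List.drop_eq_nil_of_le (by omega)
      rw [this] at hsuf
      rw [hkw] at hsuf
      simp at hsuf
    have hhead : tl[j]? = some c := by
      rw [← List.head?_drop, ← hsuf, hkw]
      rfl
    have hgetD : tl.getD j ' ' = c := by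
      rw [List.getD_eq_getElem?_getD, hhead]; rfl
    refine Or.inr ⟨j, hj, ?_, (PySem.Chars.startswith_iff _ _).mpr ⟨suf, hsuf⟩⟩
    rw [mem_bucket]
    exact ⟨hk, by rw [hkw, hgetD]; rfl⟩

lemma sum_map_filter (q : String → Bool) (f : String → Int) :
    ∀ (l : List String), ((l.filter q).map f).sum = (l.map (fun x => if q x then f x else 0)).sum := by
  intro l
  induction l with
  | nil => simp
  | cons a t ih => by_cases h : q a <;> simp [h, ih]

set_option maxRecDepth 4096 in
lemma score_eq (tl : List Char) :
    List.foldl (fun a kw => a + pvWeight.getD kw 0) 0 (pvFound tl)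
      = sumP (fun kw => PySem.Chars.isIn kw.toList tl) pvPairs := by
  set p : String → Bool := fun kw => PySem.Chars.isIn kw.toList tl with hp
  rw [PySem.List.foldl_add]
  have hperm : (pvFound tl).Perm (pvWeight.keys.filter p) := by
    rw [List.perm_ext_iff_of_nodup (nodup_pvFound tl) (nodup_keys_pvWeight.filter _)]
    intro kw
    rw [mem_pvFound, List.mem_filter, hp]
  rw [List.Perm.sum_eq (hperm.map (fun kw => pvWeight.getD kw 0)), sum_map_filter]
  have hitems : sumP p pvWeight.items
      = (pvWeight.keys.map (fun k => if p k then pvWeight.getD k 0 else 0)).sum := by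
    rw [PySem.Dict.items_eq_map_keys pvWeight nodup_keys_pvWeight 0]
    unfold sumP
    rw [List.map_map]
    rfl
  have hflat : sumP p pvWeight.items = sumP p pvPairs := by
    have h := merge_sum p pvPairs PySem.Dict.empty PySem.Dict.nodup_keys_empty
    rw [← pvWeight_eq_flat] at h
    have h0 : sumP p (PySem.Dict.empty : PySem.Dict String Int).items = 0 := rfl
    rw [h0] at h
    simpa using h
  rw [zero_add, ← hitems, hflat]

-- ===== VERDICT =====
theorem classify_toxicity_spec : Claim_equal_classify_toxicity := by
  intro text subreddit _
  unfold Spec_classify_toxicity classify_toxicity classify_toxicity_alt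
  have hscore :
      pvToxicCats.foldl (fun acc p =>
        let category_count : Int := (p.2.countP (fun kw => PySem.Str.isIn kw (PySem.Str.lower text)) : Int)
        if p.1 ∈ (["hate_speech", "threats", "self_harm"] : List String) then acc + category_count * 5
        else if p.1 ∈ (["harassment", "discrimination"] : List String) then acc + category_count * 3
        else acc + category_count * 2) 0
      = List.foldl (fun a kw => a + pvWeight.getD kw 0) 0 (pvFound (PySem.Str.lower text).toList) := by
    rw [score_eq, ← A_fold_eq]
    simp [PySem.Str.isIn]
  rw [show pvFound (PySem.Str.lower text).toList = (List.range (PySem.Str.lower text).toList.length).foldl _ PySem.Set.empty from rfl] at hscore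
  simp only [← hscore]
  cases subreddit <;> split_ifs <;> rfl
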